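-- pv_equiv track=rewrite | github.com/BlackMegaLogan/LONG | longc.py | parse_uint_like_vm
-- ===== SOURCE A (Python) =====
-- def parse_uint_like_vm(value):
--     s = str(value).strip()
--     acc = 0
--     for ch in s:
--         if ch < '0' or ch > '9':
--             break
--         acc = acc * 10 + (ord(ch) - ord('0'))
--     return acc
-- ===== SOURCE B (Python) =====
-- def parse_uint_like_vm(value):
--     # str(int).strip() is just str(int); its digit prefix is the whole number
--     # for non-negative ints and empty (the '-' sign stops the scan) otherwise.
--     return value if value >= 0 else 0
-- ===== Notes on version B (the rewrite author's own statement) =====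
-- stated objective: simpler
-- what changed: Replaces the stringify-strip-and-scan digit accumulator with a closed-form branch: for an int argument the digit prefix of its decimal string is the whole number when the value is non-negative, and empty (the minus sign stops the scan) otherwise.
import Mathlib
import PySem

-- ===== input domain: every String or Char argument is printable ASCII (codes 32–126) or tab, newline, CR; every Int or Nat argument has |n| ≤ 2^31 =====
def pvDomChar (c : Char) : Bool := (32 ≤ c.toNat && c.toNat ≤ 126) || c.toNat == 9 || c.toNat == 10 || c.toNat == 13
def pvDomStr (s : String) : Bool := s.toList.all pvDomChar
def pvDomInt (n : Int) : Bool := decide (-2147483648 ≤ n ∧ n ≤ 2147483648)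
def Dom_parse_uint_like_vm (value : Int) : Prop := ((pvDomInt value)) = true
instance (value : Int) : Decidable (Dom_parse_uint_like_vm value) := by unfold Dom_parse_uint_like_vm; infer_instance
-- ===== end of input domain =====

-- B replaces A's stringify-then-scan digit accumulator with the closed form
-- max(value, 0): simpler, no string round-trip.

-- ===== PORT A =====
-- the 'for ch in s: if ch < '0' or ch > '9': break; acc = acc*10 + (ord(ch)-ord('0'))' loop
def pvLoopA : List Char → Int → Int
  | [], acc => acc
  | c :: cs, acc =>
      if c < '0' ∨ c > '9' then acc
      else pvLoopA cs (acc * 10 + ((c.toNat : Int) - ('0'.toNat : Int)))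

def parse_uint_like_vm (value : Int) : Int :=
  pvLoopA (PySem.Chars.strip (PySem.Int.toChars value)) 0

-- ===== PORT B =====
def parse_uint_like_vm_alt (value : Int) : Int :=
  if 0 ≤ value then value else 0

-- ===== PRECONDITION & SPEC =====
def Spec_parse_uint_like_vm (value : Int) (out : Int) : Prop := out = parse_uint_like_vm_alt value
instance (value : Int) (out : Int) : Decidable (Spec_parse_uint_like_vm value out) := by unfold Spec_parse_uint_like_vm; infer_instance

-- ===== CLAIM (what is proved, stated in full; the proofs are below) =====
def Claim_equal_parse_uint_like_vm : Prop := ∀ (value : Int), Dom_parse_uint_like_vm value → Spec_parse_uint_like_vm value (parse_uint_like_vm value)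

-- ===== LEMMAS AND PROOFS =====

-- the most-significant-first decimal digit characters of a natural number
def pvD (n : Nat) : List Char :=
  if _h : n < 10 then [Nat.digitChar n]
  else pvD (n / 10) ++ [Nat.digitChar (n % 10)]
decreasing_by exact Nat.div_lt_self (by omega) (by omega)

lemma pvD_toDigitsCore (fuel : Nat) : ∀ (n : Nat) (ds : List Char), n < fuel →
    Nat.toDigitsCore 10 fuel n ds = pvD n ++ ds := by
  induction fuel with
  | zero => intro n ds h; omega
  | succ f ih =>
    intro n ds h
    rw [Nat.toDigitsCore]
    by_cases h0 : n / 10 = 0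
    · have hn : n < 10 := by omega
      simp [h0, pvD, hn, Nat.mod_eq_of_lt hn]
    · have hge : ¬ n < 10 := by omega
      have hlt : n / 10 < f := by
        have := Nat.div_lt_self (by omega : 0 < n) (by omega : 1 < 10)
        omega
      simp only [h0, if_false, ih (n / 10) _ hlt]
      conv_rhs => rw [pvD]
      simp [hge]

lemma pvD_toDigits (n : Nat) : Nat.toDigits 10 n = pvD n := by
  simpa using pvD_toDigitsCore (n + 1) n [] (Nat.lt_succ_self n)

lemma digitChar_facts (d : Nat) (hd : d < 10) :
    ¬(Nat.digitChar d < '0' ∨ Nat.digitChar d > '9') ∧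
    ((Nat.digitChar d).toNat : Int) - ('0'.toNat : Int) = (d : Int) ∧
    PySem.Chars.isspace (Nat.digitChar d) = false := by
  interval_cases d <;> refine ⟨by decide, by decide, by decide⟩

lemma pvD_no_space : ∀ (n : Nat), ∀ c ∈ pvD n, PySem.Chars.isspace c = false := by
  intro n
  induction n using Nat.strong_induction_on with
  | _ n ih =>
    intro c hc
    by_cases h : n < 10
    · rw [pvD] at hc; simp [h] at hc
      simpa [hc] using (digitChar_facts n h).2.2
    · rw [pvD] at hc; simp [h] at hc
      rcases hc with hc | hc
      · exact ih (n / 10) (Nat.div_lt_self (by omega) (by omega)) c hc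
      · simpa [hc] using (digitChar_facts (n % 10) (Nat.mod_lt n (by omega))).2.2

lemma dropWhile_no (l : List Char) (h : ∀ c ∈ l, PySem.Chars.isspace c = false) :
    List.dropWhile PySem.Chars.isspace l = l := by
  cases l with
  | nil => rfl
  | cons c cs => simp [List.dropWhile, h c (by simp)]

lemma strip_no_space (l : List Char) (h : ∀ c ∈ l, PySem.Chars.isspace c = false) :
    PySem.Chars.strip l = l := by
  unfold PySem.Chars.strip PySem.Chars.lstrip PySem.Chars.rstrip
  rw [dropWhile_no l h, dropWhile_no l.reverse (fun c hc => h c (List.mem_reverse.mp hc)),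
    List.reverse_reverse]

lemma pvLoopA_pvD (n : Nat) : ∀ (acc : Int) (rest : List Char),
    pvLoopA (pvD n ++ rest) acc = pvLoopA rest (acc * 10 ^ (pvD n).length + n) := by
  induction n using Nat.strong_induction_on with
  | _ n ih =>
    intro acc rest
    by_cases h : n < 10
    · have h1 : pvD n = [Nat.digitChar n] := by rw [pvD]; simp [h]
      rw [h1]
      simp only [List.singleton_append, List.length_cons, List.length_nil, pvLoopA]
      rw [if_neg (digitChar_facts n h).1, (digitChar_facts n h).2.1]
      norm_num
    · have h1 : pvD n = pvD (n / 10) ++ [Nat.digitChar (n % 10)] := by rw [pvD]; simp [h]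
      rw [h1, List.append_assoc, List.singleton_append,
        ih (n / 10) (Nat.div_lt_self (by omega) (by omega))]
      simp only [pvLoopA]
      rw [if_neg (digitChar_facts (n % 10) (Nat.mod_lt n (by omega))).1,
        (digitChar_facts (n % 10) (Nat.mod_lt n (by omega))).2.1]
      congr 1
      have hm : ((n / 10 : Nat) : Int) * 10 + ((n % 10 : Nat) : Int) = (n : Int) := by
        have := Nat.div_add_mod n 10; omega
      rw [List.length_append, List.length_singleton, pow_succ]
      linear_combination hm

-- ===== VERDICT (by name: the statement is the Claim_ definition above) =====
theorem parse_uint_like_vm_spec : Claim_equal_parse_uint_like_vm := by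
  intro value _
  unfold Spec_parse_uint_like_vm parse_uint_like_vm parse_uint_like_vm_alt PySem.Int.toChars
  by_cases hv : value < 0
  · rw [if_pos hv, if_neg (by omega), pvD_toDigits]
    rw [strip_no_space _ (by
      intro c hc
      rcases List.mem_cons.mp hc with h | h
      · subst h; decide
      · exact pvD_no_space _ c h)]
    simp [pvLoopA]
  · rw [if_neg hv, if_pos (by omega), pvD_toDigits]
    rw [strip_no_space _ (pvD_no_space _), ← List.append_nil (pvD value.toNat)]
    rw [pvLoopA_pvD value.toNat 0 []]
    simp [pvLoopA]
    omega
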